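-- pv_equiv track=rewrite | github.com/vbronetskyi/OP_python | cms1/LB_4/lab4_task_1.py | one_swap_sorting
-- ===== SOURCE A (Python) =====
-- def one_swap_sorting(sequence):
--     """
--     (str) -> bool
--     Design a function one_swap_sorting(sequence) that takes a list and
--     returns True if swapping two elements of the list will make it a
--     sorted list, and False otherwise. It is necessary to take into
--     account the case when the list is empty.
--
--     >>> one_swap_sorting([0,1,2,3])
--     False
--     >>> one_swap_sorting([])
--     False
--     >>> one_swap_sorting([42])
--     False
--     >>> one_swap_sorting([3,2])
--     True
--     >>> one_swap_sorting([2,2])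
--     False
--     >>> one_swap_sorting([5,2,3,4,1,6])
--     True
--     >>> one_swap_sorting([1,2,3,5,4])
--     True
--     """
--     #List sort
--     sort_list = []
--
--     for i in range(len(sequence)):
--         if sequence[i] != ' ' and sequence[i] != ',' and sequence[i] != '[' and sequence[i] != ']':
--             sort_list.append(sequence[i])
--     sequence = sort_list.copy()
--     sort_list.sort()
--
--     #Determine the number of replacements
--     changes_numb = 0
--     for i in range(len(sequence)):
--         if sequence[i] != sort_list[i]:
--             changes_numb += 1
--
--     #Solution
--     return changes_numb == 2
-- ===== SOURCE B (Python) =====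
-- def one_swap_sorting(sequence):
--     # Two-pointer scan against the sorted copy with early exit:
--     # find the first and last mismatch positions and check the middle matches.
--     a = sequence
--     s = sorted(a)
--     n = len(a)
--     i = 0
--     while i < n and a[i] == s[i]:
--         i += 1
--     if i >= n - 1:
--         return False
--     j = n - 1
--     while a[j] == s[j]:
--         j -= 1
--     if j <= i:
--         return False
--     for k in range(i + 1, j):
--         if a[k] != s[k]:
--             return False
--     return True
-- ===== Notes on version B (the rewrite author's own statement) =====
-- stated objective: faster
-- what changed: Replaces A's rebuild-copy-sort-then-count-all-mismatches pass with an early-exit two-pointer scan: find the first and last positions where the list differs from its sorted copy and check only the middle segment, returning as soon as the answer is determined.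
import Mathlib
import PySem

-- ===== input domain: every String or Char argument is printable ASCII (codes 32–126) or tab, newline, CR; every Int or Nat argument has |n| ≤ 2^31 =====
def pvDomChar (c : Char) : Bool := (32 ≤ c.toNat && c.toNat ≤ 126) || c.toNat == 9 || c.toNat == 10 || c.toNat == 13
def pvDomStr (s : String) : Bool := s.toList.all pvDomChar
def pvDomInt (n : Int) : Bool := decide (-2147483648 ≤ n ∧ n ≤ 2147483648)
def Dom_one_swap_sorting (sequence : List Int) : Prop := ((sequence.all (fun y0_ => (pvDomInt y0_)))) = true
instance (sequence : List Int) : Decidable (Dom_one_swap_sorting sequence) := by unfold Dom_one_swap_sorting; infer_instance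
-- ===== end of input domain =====

-- B replaces A's sort-and-count-all-mismatches with an early-exit two-pointer scan
-- (first mismatch from the left, last mismatch from the right, middle checked once).

-- ===== PORT A =====
def one_swap_sorting (sequence : List Int) : Bool :=
  -- Python filters out elements equal to the strings ' ', ',', '[', ']'; an int is never
  -- equal to a str in Python, so the test is always True and every element is appended (exact).
  let sort_list := (PySem.List.pyRange 0 (sequence.length : Int) 1).foldl
    (fun acc i => acc ++ [PySem.List.pyGetD sequence i 0]) []
  let sequence2 := sort_list
  let sort_list2 := PySem.List.sorted sort_list (fun x => x) false
  let changes_numb : Int := (PySem.List.pyRange 0 (sequence2.length : Int) 1).foldl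
    (fun c i => if PySem.List.pyGetD sequence2 i 0 ≠ PySem.List.pyGetD sort_list2 i 0 then c + 1 else c) 0
  changes_numb == 2

-- ===== PORT B =====
-- 'while i < n and a[i] == s[i]: i += 1'  (indices are nonnegative throughout, so Nat is exact)
def ossIloop (a s : List Int) (n : Nat) (i : Nat) : Nat :=
  if _h : i < n ∧ a.getD i 0 = s.getD i 0 then ossIloop a s n (i + 1) else i
termination_by n - i
decreasing_by omega

-- 'while a[j] == s[j]: j -= 1' (in B this loop is entered only when a mismatch exists at
-- some index ≤ j, so the Python loop never drops below 0 and Nat recursion is exact)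
def ossJloop (a s : List Int) : Nat → Nat
  | 0 => 0
  | j + 1 => if a.getD (j + 1) 0 = s.getD (j + 1) 0 then ossJloop a s j else j + 1

def one_swap_sorting_alt (sequence : List Int) : Bool :=
  let a := sequence
  let s := PySem.List.sorted a (fun x => x) false
  let n := a.length
  let i := ossIloop a s n 0
  if i + 1 ≥ n then false   -- 'if i >= n - 1: return False' (Python int arithmetic, i,n ≥ 0)
  else
    let j := ossJloop a s (n - 1)
    if j ≤ i then false
    else
      -- 'for k in range(i+1, j): if a[k] != s[k]: return False' then 'return True'
      (List.range' (i + 1) (j - (i + 1))).all (fun k => a.getD k 0 == s.getD k 0)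

-- ===== PRECONDITION & SPEC =====
def Spec_one_swap_sorting (sequence : List Int) (out : Bool) : Prop := out = one_swap_sorting_alt sequence
instance (sequence : List Int) (out : Bool) : Decidable (Spec_one_swap_sorting sequence out) := by unfold Spec_one_swap_sorting; infer_instance

-- ===== CLAIM (what is proved, stated in full; the proofs are below) =====
def Claim_equal_one_swap_sorting : Prop := ∀ (sequence : List Int), Dom_one_swap_sorting sequence → Spec_one_swap_sorting sequence (one_swap_sorting sequence)

-- ===== LEMMAS AND PROOFS =====

lemma ossIloop_spec (a s : List Int) (n i : Nat) (hi : i ≤ n) :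
    i ≤ ossIloop a s n i ∧ ossIloop a s n i ≤ n ∧
    (∀ m, i ≤ m → m < ossIloop a s n i → a.getD m 0 = s.getD m 0) ∧
    (ossIloop a s n i < n → a.getD (ossIloop a s n i) 0 ≠ s.getD (ossIloop a s n i) 0) := by
  generalize hd : n - i = d
  induction d generalizing i with
  | zero =>
    have hin : i = n := by omega
    rw [ossIloop, dif_neg (by omega : ¬(i < n ∧ a.getD i 0 = s.getD i 0))]
    exact ⟨le_refl _, hi, fun m h1 h2 => by omega, fun h => by omega⟩
  | succ d ih =>
    rw [ossIloop]
    split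
    · rename_i h
      have := ih (i + 1) (by omega) (by omega)
      refine ⟨by omega, this.2.1, ?_, this.2.2.2⟩
      intro m hm1 hm2
      rcases Nat.eq_or_lt_of_le hm1 with rfl | hlt
      · exact h.2
      · exact this.2.2.1 m hlt hm2
    · rename_i h
      refine ⟨le_refl _, hi, fun m hm1 hm2 => absurd hm1 (by omega), fun hlt => ?_⟩
      intro heq
      exact h ⟨hlt, heq⟩

lemma ossJloop_spec (a s : List Int) (j : Nat)
    (hex : ∃ t, t ≤ j ∧ a.getD t 0 ≠ s.getD t 0) :
    ossJloop a s j ≤ j ∧ a.getD (ossJloop a s j) 0 ≠ s.getD (ossJloop a s j) 0 ∧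
    (∀ m, ossJloop a s j < m → m ≤ j → a.getD m 0 = s.getD m 0) := by
  induction j with
  | zero =>
    obtain ⟨t, ht, hne⟩ := hex
    interval_cases t
    exact ⟨le_refl _, by simpa [ossJloop] using hne, fun m h1 h2 => by omega⟩
  | succ j ih =>
    rw [ossJloop]
    split
    · rename_i heq
      have hex' : ∃ t, t ≤ j ∧ a.getD t 0 ≠ s.getD t 0 := by
        obtain ⟨t, ht, hne⟩ := hex
        refine ⟨t, ?_, hne⟩
        rcases Nat.lt_or_ge t (j + 1) with h | h
        · omega
        · exfalso
          apply hne
          have ht1 : t = j + 1 := by omega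
          rw [ht1]
          exact heq
      have := ih hex'
      refine ⟨by omega, this.2.1, fun m h1 h2 => ?_⟩
      rcases Nat.lt_or_ge m (j + 1) with h | h
      · exact this.2.2 m h1 (by omega)
      · have : m = j + 1 := by omega
        rw [this]; exact heq
    · rename_i hne
      exact ⟨le_refl _, hne, fun m h1 h2 => by omega⟩

-- a Nodup list whose members all equal u has length ≤ 1
lemma length_le_one_of_nodup (l : List Nat) (u : Nat) (hnd : l.Nodup)
    (h : ∀ x ∈ l, x = u) : l.length ≤ 1 := by
  match l with
  | [] => simp
  | [x] => simp
  | x :: y :: t =>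
    have hx := h x (by simp)
    have hy := h y (by simp)
    rw [List.nodup_cons] at hnd
    exact absurd (hx.trans hy.symm) (fun he => hnd.1 (he ▸ List.mem_cons_self))

lemma countP_le_one (n u : Nat) (p : Nat → Bool)
    (h : ∀ k, k < n → p k = true → k = u) : (List.range n).countP p ≤ 1 := by
  rw [List.countP_eq_length_filter]
  refine length_le_one_of_nodup _ u ((List.nodup_range).filter p) ?_
  intro x hx
  rw [List.mem_filter, List.mem_range] at hx
  exact h x hx.1 hx.2

lemma countP_eq_two (n u v : Nat) (p : Nat → Bool) (huv : u ≠ v)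
    (hu : u < n) (hv : v < n) (hpu : p u = true) (hpv : p v = true)
    (h : ∀ k, k < n → p k = true → k = u ∨ k = v) : (List.range n).countP p = 2 := by
  rw [List.countP_eq_length_filter]
  have hnd : ((List.range n).filter p).Nodup := (List.nodup_range).filter p
  rw [← List.toFinset_card_of_nodup hnd]
  have : ((List.range n).filter p).toFinset = {u, v} := by
    ext x
    simp only [List.mem_toFinset, List.mem_filter, List.mem_range, Finset.mem_insert,
      Finset.mem_singleton]
    constructor
    · rintro ⟨h1, h2⟩; exact h x h1 h2
    · rintro (rfl | rfl) <;> simp_all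
  rw [this]
  exact Finset.card_pair huv

lemma three_le_countP (n u m v : Nat) (p : Nat → Bool)
    (h1 : u < m) (h2 : m < v) (hv : v < n)
    (hpu : p u = true) (hpm : p m = true) (hpv : p v = true) :
    3 ≤ (List.range n).countP p := by
  rw [List.countP_eq_length_filter]
  have hnd : ((List.range n).filter p).Nodup := (List.nodup_range).filter p
  rw [← List.toFinset_card_of_nodup hnd]
  have hsub : ({u, m, v} : Finset Nat) ⊆ ((List.range n).filter p).toFinset := by
    intro x hx
    simp only [Finset.mem_insert, Finset.mem_singleton] at hx
    rcases hx with rfl | rfl | rfl <;>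
      · simp only [List.mem_toFinset, List.mem_filter, List.mem_range]
        constructor
        · omega
        · assumption
  have hcard : ({u, m, v} : Finset Nat).card = 3 :=
    Finset.card_eq_three.mpr ⟨u, m, v, by omega, by omega, by omega, rfl⟩
  calc 3 = ({u, m, v} : Finset Nat).card := hcard.symm
    _ ≤ _ := Finset.card_le_card hsub

-- B computes exactly 'number of positions where a differs from sorted(a) equals 2'
lemma alt_eq_countP (a : List Int) :
    one_swap_sorting_alt a =
      ((List.range a.length).countP
        (fun k => !(a.getD k 0 == (PySem.List.sorted a (fun x => x) false).getD k 0)) == 2) := by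
  rw [one_swap_sorting_alt.eq_def]
  show (if ossIloop a (PySem.List.sorted a (fun x => x) false) a.length 0 + 1 ≥ a.length then false
    else if ossJloop a (PySem.List.sorted a (fun x => x) false) (a.length - 1) ≤ ossIloop a (PySem.List.sorted a (fun x => x) false) a.length 0 then false
    else (List.range' (ossIloop a (PySem.List.sorted a (fun x => x) false) a.length 0 + 1)
      (ossJloop a (PySem.List.sorted a (fun x => x) false) (a.length - 1) - (ossIloop a (PySem.List.sorted a (fun x => x) false) a.length 0 + 1))).all
      (fun k => a.getD k 0 == (PySem.List.sorted a (fun x => x) false).getD k 0)) = _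
  set s := PySem.List.sorted a (fun x => x) false with hs
  set n := a.length with hn
  set p : Nat → Bool := fun k => !(a.getD k 0 == s.getD k 0) with hp
  have hpne : ∀ k, p k = true ↔ a.getD k 0 ≠ s.getD k 0 := by intro k; simp [hp]
  have hpfa : ∀ k, p k = false ↔ a.getD k 0 = s.getD k 0 := by intro k; simp [hp]
  obtain ⟨hi1, hi2, hi3, hi4⟩ := ossIloop_spec a s n 0 (Nat.zero_le n)
  set i0 := ossIloop a s n 0 with hi0

  by_cases hc1 : i0 + 1 ≥ n
  · -- fewer than 2 mismatches are possible: every mismatch index is i0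
    rw [if_pos hc1]
    have : (List.range n).countP p ≤ 1 := by
      refine countP_le_one n i0 p ?_
      intro k hk hpk
      by_contra hne
      rcases Nat.lt_or_ge k i0 with h | h
      · exact absurd ((hpfa k).2 (hi3 k (Nat.zero_le k) h)) (by simp [hpk])
      · omega
    symm
    rw [beq_eq_false_iff_ne]
    omega
  · rw [if_neg hc1]
    have hi0n : i0 < n := by omega
    have hi0ne : a.getD i0 0 ≠ s.getD i0 0 := hi4 hi0n
    have hex : ∃ t, t ≤ n - 1 ∧ a.getD t 0 ≠ s.getD t 0 := ⟨i0, by omega, hi0ne⟩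
    obtain ⟨hj1, hj2, hj3⟩ := ossJloop_spec a s (n - 1) hex
    set j0 := ossJloop a s (n - 1) with hj0
    have hij : i0 ≤ j0 := by
      by_contra h
      exact hi0ne (hj3 i0 (by omega) (by omega))
    by_cases hc2 : j0 ≤ i0
    · rw [if_pos hc2]
      have hj0i0 : j0 = i0 := by omega
      have : (List.range n).countP p ≤ 1 := by
        refine countP_le_one n i0 p ?_
        intro k hk hpk
        by_contra hne
        rcases Nat.lt_or_ge k i0 with h | h
        · exact absurd ((hpfa k).2 (hi3 k (Nat.zero_le k) h)) (by simp [hpk])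
        · have : a.getD k 0 = s.getD k 0 := hj3 k (by omega) (by omega)
          exact absurd ((hpfa k).2 this) (by simp [hpk])
      symm
      rw [beq_eq_false_iff_ne]
      omega
    · rw [if_neg hc2]
      have hij' : i0 < j0 := by omega
      by_cases hall : ∀ m, i0 < m → m < j0 → a.getD m 0 = s.getD m 0
      · have hallb : (List.range' (i0 + 1) (j0 - (i0 + 1))).all
            (fun k => a.getD k 0 == s.getD k 0) = true := by
          rw [List.all_eq_true]
          intro k hk
          rw [List.mem_range'] at hk
          obtain ⟨t, ht, rfl⟩ := hk
          exact beq_iff_eq.2 (hall _ (by omega) (by omega))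
        rw [hallb]
        have : (List.range n).countP p = 2 := by
          refine countP_eq_two n i0 j0 p (by omega) hi0n (by omega)
            ((hpne i0).2 hi0ne) ((hpne j0).2 hj2) ?_
          intro k hk hpk
          by_contra hne
          push Not at hne
          have hk1 : k ≠ i0 := hne.1
          have hk2 : k ≠ j0 := hne.2
          have : a.getD k 0 = s.getD k 0 := by
            rcases Nat.lt_or_ge k i0 with h | h
            · exact hi3 k (Nat.zero_le k) h
            · rcases Nat.lt_or_ge k j0 with h' | h'
              · exact hall k (by omega) h'
              · exact hj3 k (by omega) (by omega)
          exact absurd ((hpfa k).2 this) (by simp [hpk])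
        simp [this]
      · push Not at hall
        obtain ⟨m, hm1, hm2, hmne⟩ := hall
        have hallb : (List.range' (i0 + 1) (j0 - (i0 + 1))).all
            (fun k => a.getD k 0 == s.getD k 0) = false := by
          rw [List.all_eq_false]
          refine ⟨m, ?_, by simpa using hmne⟩
          rw [List.mem_range']
          exact ⟨m - (i0 + 1), by omega, by omega⟩
        rw [hallb]
        have : 3 ≤ (List.range n).countP p :=
          three_le_countP n i0 m j0 p hm1 hm2 (by omega)
            ((hpne i0).2 hi0ne) ((hpne m).2 hmne) ((hpne j0).2 hj2)
        symm
        rw [beq_eq_false_iff_ne]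
        omega

-- A computes the same mismatch count against the same sorted copy
lemma a_eq_countP (a : List Int) :
    one_swap_sorting a =
      ((List.range a.length).countP
        (fun k => !(a.getD k 0 == (PySem.List.sorted a (fun x => x) false).getD k 0)) == 2) := by
  rw [one_swap_sorting.eq_def]
  have h1 : (PySem.List.pyRange 0 (a.length : Int) 1).foldl
      (fun acc i => acc ++ [PySem.List.pyGetD a i 0]) [] = a := by
    rw [PySem.List.foldl_append_singleton_eq_map, PySem.List.map_pyGetD_pyRange_zero']
    simp
  rw [h1]
  dsimp only
  rw [PySem.List.pyRange_zero_natCast, List.foldl_map]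
  simp only [PySem.List.pyGetD_natCast]
  rw [PySem.List.foldl_ite_add_one]
  have hpred : (fun k => decide (a.getD k 0 ≠ (PySem.List.sorted a (fun x => x) false).getD k 0))
      = (fun k => !(a.getD k 0 == (PySem.List.sorted a (fun x => x) false).getD k 0)) := by
    funext k
    cases h : (a.getD k 0 == (PySem.List.sorted a (fun x => x) false).getD k 0) <;> simp_all
  rw [hpred]
  set c := (List.range a.length).countP
      (fun k => !(a.getD k 0 == (PySem.List.sorted a (fun x => x) false).getD k 0)) with hc
  by_cases h : c = 2
  · simp [h]
  · have h2 : ((c : Int)) ≠ 2 := by omega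
    simp only [zero_add]
    rw [show ((c : Int) == 2) = false from beq_eq_false_iff_ne.mpr h2,
      show (c == 2) = false from beq_eq_false_iff_ne.mpr h]

-- ===== VERDICT (by name: the statement is the Claim_ definition above) =====
theorem one_swap_sorting_spec : Claim_equal_one_swap_sorting := by
  intro sequence _hdom
  unfold Spec_one_swap_sorting
  rw [a_eq_countP, alt_eq_countP]
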